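-- pv_equiv track=rewrite | github.com/raahatarora/AP_Lab | Week3/week3q6.py | sum_of_combinations
-- ===== SOURCE A (Python) =====
-- from itertools import product
--
-- def sum_of_combinations(tuple_list):
--     # Ensure that there is at least one tuple in the list
--     if not tuple_list:
--         return 0
--
--     # Generate all possible combinations of elements from the tuples
--     combinations = product(*tuple_list)
--
--     # Calculate the summation of each combination
--     total_sum = 0
--     for combination in combinations:
--         total_sum += sum(combination)
--
--     return total_sum
-- ===== SOURCE B (Python) =====
-- def _count_and_sum(tuple_list):
--     # returns (number of combinations, sum of element-sums over all combinations)
--     if not tuple_list: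
--         return 1, 0
--     cnt, s = _count_and_sum(tuple_list[1:])
--     t = tuple_list[0]
--     return len(t) * cnt, sum(t) * cnt + len(t) * s
--
-- def sum_of_combinations(tuple_list):
--     return _count_and_sum(tuple_list)[1]
-- ===== Notes on version B (the rewrite author's own statement) =====
-- stated objective: faster
-- what changed: Replaces the enumeration of the full Cartesian product with a single linear recursion maintaining (combination count, total sum), using sum(combos of t::ts) = sum(t)*count(ts) + len(t)*sum(ts).
import Mathlib
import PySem

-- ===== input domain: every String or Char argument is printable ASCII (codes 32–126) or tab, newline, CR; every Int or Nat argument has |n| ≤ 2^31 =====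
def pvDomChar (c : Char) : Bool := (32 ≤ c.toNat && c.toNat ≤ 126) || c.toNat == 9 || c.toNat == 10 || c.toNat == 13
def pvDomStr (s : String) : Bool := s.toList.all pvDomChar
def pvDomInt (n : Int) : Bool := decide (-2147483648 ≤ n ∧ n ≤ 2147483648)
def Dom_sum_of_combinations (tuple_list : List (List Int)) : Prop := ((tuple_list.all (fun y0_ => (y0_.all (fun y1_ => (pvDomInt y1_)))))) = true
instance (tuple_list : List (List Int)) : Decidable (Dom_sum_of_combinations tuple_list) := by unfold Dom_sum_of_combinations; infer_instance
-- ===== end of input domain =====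

-- B replaces the Cartesian-product enumeration with one linear recursion maintaining (count, sum): asymptotically faster.

-- ===== PORT A =====
-- itertools.product(*tuple_list), first tuple varying slowest
def pvProduct (ts : List (List Int)) : List (List Int) :=
  match ts with
  | [] => [[]]
  | t :: rest => t.flatMap (fun x => (pvProduct rest).map (fun c => x :: c))

def sum_of_combinations (tuple_list : List (List Int)) : Int :=
  if tuple_list = [] then 0
  else (pvProduct tuple_list).foldl (fun acc c => acc + c.sum) 0

-- ===== PORT B =====
def pvCountAndSum (ts : List (List Int)) : Int × Int :=
  match ts with
  | [] => (1, 0)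
  | t :: rest =>
    let p := pvCountAndSum rest
    ((t.length : Int) * p.1, t.sum * p.1 + (t.length : Int) * p.2)

def sum_of_combinations_alt (tuple_list : List (List Int)) : Int :=
  (pvCountAndSum tuple_list).2

-- ===== PRECONDITION & SPEC =====
def Spec_sum_of_combinations (tuple_list : List (List Int)) (out : Int) : Prop := out = sum_of_combinations_alt tuple_list
instance (tuple_list : List (List Int)) (out : Int) : Decidable (Spec_sum_of_combinations tuple_list out) := by unfold Spec_sum_of_combinations; infer_instance

-- ===== CLAIM (what is proved, stated in full; the proofs are below) =====
def Claim_equal_sum_of_combinations : Prop := ∀ (tuple_list : List (List Int)), Dom_sum_of_combinations tuple_list → Spec_sum_of_combinations tuple_list (sum_of_combinations tuple_list)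

-- ===== LEMMAS AND PROOFS =====

theorem foldl_add_sum (l : List (List Int)) (init : Int) :
    l.foldl (fun acc c => acc + c.sum) init = init + (l.map List.sum).sum := by
  induction l generalizing init with
  | nil => simp
  | cons c l ih => simp [List.foldl, ih]; ring

theorem countAndSum_eq (ts : List (List Int)) :
    pvCountAndSum ts = (((pvProduct ts).length : Int), ((pvProduct ts).map List.sum).sum) := by
  induction ts with
  | nil => simp [pvCountAndSum, pvProduct]
  | cons t rest ih =>
    simp only [pvCountAndSum, pvProduct, ih]
    induction t with
    | nil => simp
    | cons x t iht =>
      simp only [List.flatMap_cons, List.length_append, List.map_append, List.sum_append,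
        List.length_map, List.map_map, List.sum_cons, List.length_cons] at *
      rw [Prod.mk.injEq] at iht ⊢
      obtain ⟨h1, h2⟩ := iht
      have hmap : ((pvProduct rest).map (List.sum ∘ fun c => x :: c)).sum
          = x * ((pvProduct rest).length : Int) + ((pvProduct rest).map List.sum).sum := by
        induction pvProduct rest with
        | nil => simp
        | cons a l ih2 => simp only [List.map_cons, List.sum_cons, List.length_cons, ih2,
            Function.comp_apply]; push_cast; ring
      refine ⟨by push_cast at h1 ⊢; linarith, ?_⟩
      rw [hmap]
      push_cast at h1 h2 ⊢
      linarith

-- ===== VERDICT (by name: the statement is the Claim_ definition above) =====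
theorem sum_of_combinations_spec : Claim_equal_sum_of_combinations := by
  intro ts _
  unfold Spec_sum_of_combinations sum_of_combinations sum_of_combinations_alt
  rw [countAndSum_eq]
  cases ts with
  | nil => simp [pvProduct]
  | cons t rest => simp [foldl_add_sum]
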